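-- pv_equiv track=rewrite | github.com/scott009/InquiryCircle | add_tibetan_keys.py | add_tibetan_keys_to_paragraph
-- ===== SOURCE A (Python) =====
-- from collections import OrderedDict
--
-- def add_tibetan_keys_to_paragraph(paragraph):
--     """Add tibetan_text key to a paragraph after Chinese_Simplified_text."""
--     if "text" not in paragraph:
--         return paragraph
--
--     # Create new ordered dict with correct key order
--     new_para = OrderedDict()
--
--     for key, value in paragraph.items():
--         new_para[key] = value
--         # Insert tibetan_text after Chinese_Simplified_text
--         if key == "Chinese_Simplified_text":
--             new_para["tibetan_text"] = paragraph.get("tibetan_text", "")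
--
--     return new_para
-- ===== SOURCE B (Python) =====
-- def add_tibetan_keys_to_paragraph(paragraph):
--     """Add tibetan_text key to a paragraph after Chinese_Simplified_text."""
--     keys = list(paragraph)
--     if "text" not in keys or "Chinese_Simplified_text" not in keys:
--         return dict(paragraph)
--     i = keys.index("Chinese_Simplified_text")
--     if "tibetan_text" in keys[:i + 1]:
--         # tibetan_text already sits at or before the anchor: nothing moves
--         return dict(paragraph)
--     rest = [(k, v) for k, v in paragraph.items() if k != "tibetan_text"]
--     rest.insert(i + 1, ("tibetan_text", paragraph.get("tibetan_text", "")))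
--     return dict(rest)
-- ===== Notes on version B (the rewrite author's own statement) =====
-- stated objective: alternative
-- what changed: B replaces A's rebuild-the-whole-dict loop (with a conditional mid-loop insertion relying on OrderedDict overwrite semantics) by an index computation and a single list splice: find the anchor's index, return the dict unchanged unless tibetan_text must move, otherwise filter out any existing tibetan_text pair and insert it right after the anchor.
import Mathlib
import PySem

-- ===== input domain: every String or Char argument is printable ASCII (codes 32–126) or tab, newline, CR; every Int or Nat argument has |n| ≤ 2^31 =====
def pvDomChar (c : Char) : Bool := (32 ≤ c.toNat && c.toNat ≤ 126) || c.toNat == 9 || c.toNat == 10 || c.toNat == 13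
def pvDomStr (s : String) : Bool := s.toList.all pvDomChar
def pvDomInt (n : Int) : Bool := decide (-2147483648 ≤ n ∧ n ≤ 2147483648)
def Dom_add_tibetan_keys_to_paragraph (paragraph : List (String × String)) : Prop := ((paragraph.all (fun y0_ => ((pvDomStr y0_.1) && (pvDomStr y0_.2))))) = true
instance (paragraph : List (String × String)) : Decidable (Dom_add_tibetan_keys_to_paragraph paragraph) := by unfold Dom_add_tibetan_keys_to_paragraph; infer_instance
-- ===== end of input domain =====

-- B replaces A's rebuild-everything dict loop by find-anchor-index + one list splice (same O(n) cost, different decomposition); return-value equivalence on duplicate-key-free association lists (Python dicts).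


-- ===== PORT A =====
def add_tibetan_keys_to_paragraph (paragraph : List (String × String)) : List (String × String) :=
  let p := PySem.Dict.mk paragraph
  if !(p.contains "text") then paragraph
  else
    (paragraph.foldl (fun d kv =>
        let d' := d.insert kv.1 kv.2
        if kv.1 == "Chinese_Simplified_text" then
          d'.insert "tibetan_text" (p.getD "tibetan_text" "")
        else d')
      PySem.Dict.empty).items

-- ===== PORT B =====
def add_tibetan_keys_to_paragraph_alt (paragraph : List (String × String)) : List (String × String) :=
  let keys := paragraph.map Prod.fst
  if !(keys.contains "text") || !(keys.contains "Chinese_Simplified_text") then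
    (PySem.Dict.ofList paragraph).items
  else
    match PySem.List.index? keys "Chinese_Simplified_text" with
    | none => (PySem.Dict.ofList paragraph).items
    | some i =>
      if (keys.take (i + 1)).contains "tibetan_text" then
        (PySem.Dict.ofList paragraph).items
      else
        let rest := paragraph.filter (fun kv => kv.1 != "tibetan_text")
        let rest := PySem.List.insert rest ((i : Int) + 1)
          ("tibetan_text", (PySem.Dict.mk paragraph).getD "tibetan_text" "")
        (PySem.Dict.ofList rest).items

-- ===== PRECONDITION & SPEC =====
-- A's argument is a Python dict, so its keys are necessarily distinct; Pre_ restricts the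
-- association lists to exactly those that represent a dict (no duplicate keys).
def Pre_add_tibetan_keys_to_paragraph (paragraph : List (String × String)) : Prop :=
  (paragraph.map Prod.fst).Nodup
instance (paragraph : List (String × String)) : Decidable (Pre_add_tibetan_keys_to_paragraph paragraph) := by unfold Pre_add_tibetan_keys_to_paragraph; infer_instance

def pvWitness_add_tibetan_keys_to_paragraph : (List (String × String)) :=
  [("text", "hello"), ("Chinese_Simplified_text", "ni hao"), ("note", "x")]

def Spec_add_tibetan_keys_to_paragraph (paragraph : List (String × String)) (out : List (String × String)) : Prop := out = add_tibetan_keys_to_paragraph_alt paragraph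
instance (paragraph : List (String × String)) (out : List (String × String)) : Decidable (Spec_add_tibetan_keys_to_paragraph paragraph out) := by unfold Spec_add_tibetan_keys_to_paragraph; infer_instance

-- ===== CLAIM (what is proved, stated in full; the proofs are below) =====
def Claim_equal_add_tibetan_keys_to_paragraph : Prop := ∀ (paragraph : List (String × String)), Dom_add_tibetan_keys_to_paragraph paragraph → Pre_add_tibetan_keys_to_paragraph paragraph → Spec_add_tibetan_keys_to_paragraph paragraph (add_tibetan_keys_to_paragraph paragraph)

-- ===== LEMMAS AND PROOFS =====

-- in a duplicate-key-free association list, entries are determined by their key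
theorem eq_of_fst_eq {α β : Type} (l : List (α × β)) (h : (l.map Prod.fst).Nodup)
    {p q : α × β} (hp : p ∈ l) (hq : q ∈ l) (hfst : p.1 = q.1) : p = q := by
  induction l with
  | nil => cases hp
  | cons x xs ih =>
    simp only [List.map_cons, List.nodup_cons] at h
    rcases List.mem_cons.1 hp with rfl | hp' <;> rcases List.mem_cons.1 hq with rfl | hq'
    · rfl
    · exact absurd (hfst ▸ List.mem_map_of_mem hq') h.1
    · exact absurd (hfst ▸ List.mem_map_of_mem hp') h.1
    · exact ih h.2 hp' hq'

-- re-inserting a pair the dict already holds changes nothing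
theorem insert_absorbed {t tv : String} (d : PySem.Dict String String)
    (hnd : d.keys.Nodup) (htib : (t, tv) ∈ d.items) : d.insert t tv = d := by
  apply PySem.Dict.ext
  have hcont : d.contains t = true := by
    rw [PySem.Dict.contains_iff_mem_keys]
    exact List.mem_map_of_mem htib
  rw [PySem.Dict.items_insert_of_contains d tv hcont]
  rw [show d.items = d.items.map id from (List.map_id _).symm, List.map_map]
  apply List.map_congr_left
  intro p hp
  simp only [Function.comp, id]
  by_cases hpt : p.1 = t
  · have : p = (t, tv) :=
      eq_of_fst_eq d.items (by simpa [PySem.Dict.keys] using hnd) hp htib hpt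
    simp [this]
  · simp [hpt]

-- dict(l) on a duplicate-key-free association list keeps it unchanged
theorem ofList_items_of_nodup (l : List (String × String))
    (h : (l.map Prod.fst).Nodup) : (PySem.Dict.ofList l).items = l := by
  have := PySem.Dict.items_foldl_insert_fresh (l := l) (k := Prod.fst) (v := Prod.snd)
    (d := PySem.Dict.empty) (by simp) h
  simpa [PySem.Dict.ofList] using this

-- folding `d[k] = v` over pairs whose keys are fresh except possibly t —
-- where d already holds (t, tv) and every t-pair of the list carries tv —
-- appends everything except the t-pairs
theorem foldl_insert_absorb (t : String) (tv : String)
    (post : List (String × String)) (d : PySem.Dict String String)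
    (hnd : d.keys.Nodup)
    (hpnd : (post.map Prod.fst).Nodup)
    (hfresh : ∀ kv ∈ post, kv.1 ≠ t → d.contains kv.1 = false)
    (htib : (t, tv) ∈ d.items)
    (hval : ∀ kv ∈ post, kv.1 = t → kv.2 = tv) :
    (post.foldl (fun d kv => d.insert kv.1 kv.2) d).items
      = d.items ++ post.filter (fun kv => kv.1 != t) := by
  induction post generalizing d with
  | nil => simp
  | cons kv rest ih =>
    simp only [List.map_cons, List.nodup_cons] at hpnd
    by_cases hk : kv.1 = t
    · have hv : kv.2 = tv := hval kv (List.mem_cons_self) hk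
      have hins : d.insert kv.1 kv.2 = d := by
        rw [hk, hv]; exact insert_absorbed d hnd htib
      rw [List.foldl_cons, hins]
      rw [ih d hnd hpnd.2
        (fun kv' h' => hfresh kv' (List.mem_cons_of_mem _ h'))
        htib (fun kv' h' => hval kv' (List.mem_cons_of_mem _ h'))]
      simp [hk]
    · have hcont : d.contains kv.1 = false := hfresh kv List.mem_cons_self hk
      have hitems : (d.insert kv.1 kv.2).items = d.items ++ [kv] := by
        simpa using PySem.Dict.items_insert_of_not_contains d kv.2 hcont
      have hnd' : (d.insert kv.1 kv.2).keys.Nodup := by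
        have hkeys : (d.insert kv.1 kv.2).keys = d.keys ++ [kv.1] := by
          simp [PySem.Dict.keys, hitems]
        rw [hkeys]
        refine List.Nodup.append hnd (List.nodup_singleton _) ?_
        intro a ha hb
        simp at hb
        subst hb
        have := (PySem.Dict.contains_iff_mem_keys d kv.1).2 ha
        simp [this] at hcont
      rw [List.foldl_cons,
        ih (d.insert kv.1 kv.2) hnd' hpnd.2
          (fun kv' h' hne => by
            rw [PySem.Dict.contains_insert]
            have h1 : (kv'.1 == kv.1) = false := by
              have : kv'.1 ≠ kv.1 := fun he => hpnd.1 (he ▸ List.mem_map_of_mem h')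
              simp [this]
            rw [h1, hfresh kv' (List.mem_cons_of_mem _ h') hne]
            rfl)
          (by rw [hitems]; exact List.mem_append_left _ htib)
          (fun kv' h' => hval kv' (List.mem_cons_of_mem _ h')),
        hitems]
      simp [hk]

-- Python's list.insert at an in-range non-negative position
theorem pyinsert_natCast {α : Type} (xs : List α) (n : Nat) (v : α) (h : n ≤ xs.length) :
    PySem.List.insert xs (n : Int) v = xs.take n ++ v :: xs.drop n := by
  simp [PySem.List.insert, PySem.List.sliceIndices]
  have h1 : (if (n : Int) < 0 then max ((n : Int) + xs.length) 0
      else min (n : Int) xs.length).toNat = n := by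
    rw [if_neg (by omega)]; omega
  rw [h1]

theorem main_equiv (l : List (String × String)) (hpre : (l.map Prod.fst).Nodup) :
    add_tibetan_keys_to_paragraph l = add_tibetan_keys_to_paragraph_alt l := by
  unfold add_tibetan_keys_to_paragraph add_tibetan_keys_to_paragraph_alt
  by_cases htext : "text" ∈ l.map Prod.fst
  · have h1 : (l.any fun p => p.1 == "text") = true := by
      rw [List.any_eq_true]
      obtain ⟨p, hp, hfst⟩ := List.mem_map.1 htext
      exact ⟨p, hp, by simp [hfst]⟩
    have h2 : (l.map Prod.fst).contains "text" = true := List.contains_iff_mem.2 htext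
    rw [if_neg (by rw [PySem.Dict.contains_mk, h1]; simp)]
    by_cases hanch : "Chinese_Simplified_text" ∈ l.map Prod.fst
    · -- the anchor key is present: split the list at its first occurrence
      have h3 : (l.map Prod.fst).contains "Chinese_Simplified_text" = true :=
        List.contains_iff_mem.2 hanch
      rw [if_neg (by rw [h2, h3]; simp)]
      obtain ⟨i, hi⟩ : ∃ i, PySem.List.index? (l.map Prod.fst) "Chinese_Simplified_text" = some i := by
        rw [← Option.isSome_iff_exists]
        exact (PySem.List.index?_isSome_iff _ _).2 hanch
      rw [hi]
      obtain ⟨kpre, ksuf, hkeys, hlen, hnotpre⟩ :=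
        (PySem.List.index?_eq_some_iff _ _ _).1 hi
      obtain ⟨pre, l2, rfl, hmappre, hmap2⟩ := List.map_eq_append_iff.1 hkeys
      obtain ⟨a, post, rfl, ha1, hmappost⟩ := List.map_eq_cons_iff.1 hmap2
      obtain ⟨a1, va⟩ := a
      simp only at ha1
      subst ha1
      subst hmappre
      subst hmappost
      subst hlen
      have hpre' := hpre
      rw [List.map_append, List.map_cons] at hpre
      obtain ⟨hnd1, hnd2, hdisj⟩ := List.nodup_append.1 hpre
      obtain ⟨hanpost, hnd3⟩ := List.nodup_cons.1 hnd2
      simp only at hanpost hdisj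
      have hget : ∀ v : String,
          ("tibetan_text", v) ∈ pre ++ ("Chinese_Simplified_text", va) :: post →
          (PySem.Dict.mk (pre ++ ("Chinese_Simplified_text", va) :: post)).getD "tibetan_text" "" = v := by
        intro v hv
        exact PySem.Dict.getD_of_mem_items _ hv (by simpa [PySem.Dict.keys] using hpre') ""
      have htake : ((pre ++ ("Chinese_Simplified_text", va) :: post).map Prod.fst).take
          ((pre.map Prod.fst).length + 1) = pre.map Prod.fst ++ ["Chinese_Simplified_text"] := by
        rw [List.map_append, List.map_cons, List.take_append,
          List.take_of_length_le (by omega)]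
        congr 1
        have h4 : (pre.map Prod.fst).length + 1 - (pre.map Prod.fst).length = 1 := by omega
        rw [h4]
        simp
      have hd1 : (List.foldl (fun d kv => d.insert kv.1 kv.2) PySem.Dict.empty pre).items
          = pre := by
        simpa using PySem.Dict.items_foldl_insert_fresh pre Prod.fst Prod.snd PySem.Dict.empty
          (by simp) hnd1
      have hd1k : (List.foldl (fun d kv => d.insert kv.1 kv.2) PySem.Dict.empty pre).keys
          = pre.map Prod.fst := by
        simp [PySem.Dict.keys, hd1]
      have hc1 : (List.foldl (fun d kv => d.insert kv.1 kv.2) PySem.Dict.empty pre).contains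
          "Chinese_Simplified_text" = false := by
        rw [Bool.eq_false_iff]
        intro h
        rw [PySem.Dict.contains_iff_mem_keys, hd1k] at h
        exact hnotpre h
      have hd1' : ((List.foldl (fun d kv => d.insert kv.1 kv.2) PySem.Dict.empty pre).insert
          "Chinese_Simplified_text" va).items = pre ++ [("Chinese_Simplified_text", va)] := by
        rw [PySem.Dict.items_insert_of_not_contains _ va hc1, hd1]
      have hd1'k : ((List.foldl (fun d kv => d.insert kv.1 kv.2) PySem.Dict.empty pre).insert
          "Chinese_Simplified_text" va).keys
          = pre.map Prod.fst ++ ["Chinese_Simplified_text"] := by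
        simp [PySem.Dict.keys, hd1']
      have hd1'nd : ((List.foldl (fun d kv => d.insert kv.1 kv.2) PySem.Dict.empty pre).insert
          "Chinese_Simplified_text" va).keys.Nodup := by
        rw [hd1'k]
        refine List.nodup_append.2 ⟨hnd1, List.nodup_singleton _, ?_⟩
        intro x hx b hb
        simp at hb
        subst hb
        exact fun he => hnotpre (he ▸ hx)
      have hcpost : ∀ d : PySem.Dict String String, List.foldl (fun d kv =>
            let d' := d.insert kv.1 kv.2
            if kv.1 == "Chinese_Simplified_text" then
              d'.insert "tibetan_text"
                ((PySem.Dict.mk (pre ++ ("Chinese_Simplified_text", va) :: post)).getD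
                  "tibetan_text" "")
            else d') d post
          = List.foldl (fun d kv => d.insert kv.1 kv.2) d post := by
        intro d
        apply PySem.List.foldl_congr_mem
        intro acc kv hkv
        have : kv.1 ≠ "Chinese_Simplified_text" :=
          fun he => hanpost (he ▸ List.mem_map_of_mem hkv)
        simp [this]
      by_cases htp : "tibetan_text" ∈ pre.map Prod.fst
      · -- tibetan_text already occurs before the anchor: nothing moves
        obtain ⟨p, hpmem, hp1⟩ := List.mem_map.1 htp
        have hpeq : ("tibetan_text", p.2) = p := by rw [← hp1]
        have hptv : (PySem.Dict.mk (pre ++ ("Chinese_Simplified_text", va) :: post)).getD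
            "tibetan_text" "" = p.2 :=
          hget p.2 (List.mem_append_left _ (hpeq ▸ hpmem))
        have htibmem : ("tibetan_text",
            (PySem.Dict.mk (pre ++ ("Chinese_Simplified_text", va) :: post)).getD
              "tibetan_text" "") ∈
            ((List.foldl (fun d kv => d.insert kv.1 kv.2) PySem.Dict.empty pre).insert
              "Chinese_Simplified_text" va).items := by
          rw [hd1', hptv]
          exact List.mem_append_left _ (hpeq ▸ hpmem)
        have hfoldA : (List.foldl (fun d kv =>
              let d' := d.insert kv.1 kv.2
              if kv.1 == "Chinese_Simplified_text" then
                d'.insert "tibetan_text"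
                  ((PySem.Dict.mk (pre ++ ("Chinese_Simplified_text", va) :: post)).getD
                    "tibetan_text" "")
              else d') PySem.Dict.empty (pre ++ ("Chinese_Simplified_text", va) :: post)).items
            = pre ++ ("Chinese_Simplified_text", va) :: post := by
          rw [List.foldl_append, List.foldl_cons,
            PySem.List.foldl_congr_mem pre _ (fun d kv => d.insert kv.1 kv.2) PySem.Dict.empty
              (fun acc kv hkv => by
                have : kv.1 ≠ "Chinese_Simplified_text" :=
                  fun he => hnotpre (he ▸ List.mem_map_of_mem hkv)
                simp [this])]
          show (List.foldl (fun d kv =>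
              let d' := d.insert kv.1 kv.2
              if kv.1 == "Chinese_Simplified_text" then
                d'.insert "tibetan_text"
                  ((PySem.Dict.mk (pre ++ ("Chinese_Simplified_text", va) :: post)).getD
                    "tibetan_text" "")
              else d')
            (((List.foldl (fun d kv => d.insert kv.1 kv.2) PySem.Dict.empty pre).insert
              "Chinese_Simplified_text" va).insert "tibetan_text"
                ((PySem.Dict.mk (pre ++ ("Chinese_Simplified_text", va) :: post)).getD
                  "tibetan_text" "")) post).items
            = pre ++ ("Chinese_Simplified_text", va) :: post
          rw [insert_absorbed _ hd1'nd htibmem, hcpost,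
            foldl_insert_absorb "tibetan_text" _ post _ hd1'nd hnd3
              (fun kv hkv _ => by
                rw [Bool.eq_false_iff]
                intro h
                rw [PySem.Dict.contains_iff_mem_keys, hd1'k] at h
                rcases List.mem_append.1 h with h' | h'
                · exact hdisj _ h' _ (List.mem_cons_of_mem _ (List.mem_map_of_mem hkv)) rfl
                · simp at h'
                  exact hanpost (h' ▸ List.mem_map_of_mem hkv))
              htibmem
              (fun kv hkv hk => absurd rfl
                (hdisj _ htp _ (List.mem_cons_of_mem _ (hk ▸ List.mem_map_of_mem hkv)))),
            hd1']
          have hfilt : post.filter (fun kv => kv.1 != "tibetan_text") = post := by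
            apply List.filter_eq_self.2
            intro kv hkv
            simp only [bne_iff_ne, ne_eq]
            exact fun he =>
              hdisj _ htp _ (List.mem_cons_of_mem _ (he ▸ List.mem_map_of_mem hkv)) rfl
          rw [hfilt]
          simp
        rw [hfoldA]
        show pre ++ ("Chinese_Simplified_text", va) :: post =
          if (((pre ++ ("Chinese_Simplified_text", va) :: post).map Prod.fst).take
              ((pre.map Prod.fst).length + 1)).contains "tibetan_text" = true then
            (PySem.Dict.ofList (pre ++ ("Chinese_Simplified_text", va) :: post)).items
          else
            (PySem.Dict.ofList (PySem.List.insert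
              ((pre ++ ("Chinese_Simplified_text", va) :: post).filter
                (fun kv => kv.1 != "tibetan_text"))
              (((pre.map Prod.fst).length : Int) + 1)
              ("tibetan_text",
                (PySem.Dict.mk (pre ++ ("Chinese_Simplified_text", va) :: post)).getD
                  "tibetan_text" ""))).items
        rw [if_pos (by
          rw [htake]
          exact List.contains_iff_mem.2 (List.mem_append_left _ htp))]
        rw [ofList_items_of_nodup _ hpre']
      · -- tibetan_text does not occur at or before the anchor: it lands right after it
        have htibne : ("tibetan_text" : String) ≠ "Chinese_Simplified_text" := by decide
        have hc2 : (((List.foldl (fun d kv => d.insert kv.1 kv.2) PySem.Dict.empty pre).insert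
            "Chinese_Simplified_text" va)).contains "tibetan_text" = false := by
          rw [Bool.eq_false_iff]
          intro h
          rw [PySem.Dict.contains_iff_mem_keys, hd1'k] at h
          rcases List.mem_append.1 h with h' | h'
          · exact htp h'
          · simp at h'
        have hd2 : (((List.foldl (fun d kv => d.insert kv.1 kv.2) PySem.Dict.empty pre).insert
            "Chinese_Simplified_text" va).insert "tibetan_text"
              ((PySem.Dict.mk (pre ++ ("Chinese_Simplified_text", va) :: post)).getD
                "tibetan_text" "")).items
            = pre ++ [("Chinese_Simplified_text", va), ("tibetan_text",
              (PySem.Dict.mk (pre ++ ("Chinese_Simplified_text", va) :: post)).getD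
                "tibetan_text" "")] := by
          rw [PySem.Dict.items_insert_of_not_contains _ _ hc2, hd1']
          simp
        have hd2k : (((List.foldl (fun d kv => d.insert kv.1 kv.2) PySem.Dict.empty pre).insert
            "Chinese_Simplified_text" va).insert "tibetan_text"
              ((PySem.Dict.mk (pre ++ ("Chinese_Simplified_text", va) :: post)).getD
                "tibetan_text" "")).keys
            = pre.map Prod.fst ++ ["Chinese_Simplified_text", "tibetan_text"] := by
          simp [PySem.Dict.keys, hd2]
        have hd2nd : (((List.foldl (fun d kv => d.insert kv.1 kv.2) PySem.Dict.empty pre).insert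
            "Chinese_Simplified_text" va).insert "tibetan_text"
              ((PySem.Dict.mk (pre ++ ("Chinese_Simplified_text", va) :: post)).getD
                "tibetan_text" "")).keys.Nodup := by
          rw [hd2k]
          refine List.nodup_append.2 ⟨hnd1, by simp, ?_⟩
          intro x hx b hb
          simp only [List.mem_cons, List.not_mem_nil, or_false] at hb
          rcases hb with rfl | rfl
          · exact fun he => hnotpre (he ▸ hx)
          · exact fun he => htp (he ▸ hx)
        have hfoldA : (List.foldl (fun d kv =>
              let d' := d.insert kv.1 kv.2
              if kv.1 == "Chinese_Simplified_text" then
                d'.insert "tibetan_text"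
                  ((PySem.Dict.mk (pre ++ ("Chinese_Simplified_text", va) :: post)).getD
                    "tibetan_text" "")
              else d') PySem.Dict.empty (pre ++ ("Chinese_Simplified_text", va) :: post)).items
            = (pre ++ [("Chinese_Simplified_text", va), ("tibetan_text",
              (PySem.Dict.mk (pre ++ ("Chinese_Simplified_text", va) :: post)).getD
                "tibetan_text" "")])
              ++ post.filter (fun kv => kv.1 != "tibetan_text") := by
          rw [List.foldl_append, List.foldl_cons,
            PySem.List.foldl_congr_mem pre _ (fun d kv => d.insert kv.1 kv.2) PySem.Dict.empty
              (fun acc kv hkv => by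
                have : kv.1 ≠ "Chinese_Simplified_text" :=
                  fun he => hnotpre (he ▸ List.mem_map_of_mem hkv)
                simp [this])]
          show (List.foldl (fun d kv =>
              let d' := d.insert kv.1 kv.2
              if kv.1 == "Chinese_Simplified_text" then
                d'.insert "tibetan_text"
                  ((PySem.Dict.mk (pre ++ ("Chinese_Simplified_text", va) :: post)).getD
                    "tibetan_text" "")
              else d')
            (((List.foldl (fun d kv => d.insert kv.1 kv.2) PySem.Dict.empty pre).insert
              "Chinese_Simplified_text" va).insert "tibetan_text"
                ((PySem.Dict.mk (pre ++ ("Chinese_Simplified_text", va) :: post)).getD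
                  "tibetan_text" "")) post).items
            = (pre ++ [("Chinese_Simplified_text", va), ("tibetan_text",
              (PySem.Dict.mk (pre ++ ("Chinese_Simplified_text", va) :: post)).getD
                "tibetan_text" "")])
              ++ post.filter (fun kv => kv.1 != "tibetan_text")
          rw [hcpost,
            foldl_insert_absorb "tibetan_text"
              ((PySem.Dict.mk (pre ++ ("Chinese_Simplified_text", va) :: post)).getD
                "tibetan_text" "") post _ hd2nd hnd3
              (fun kv hkv hne => by
                rw [Bool.eq_false_iff]
                intro h
                rw [PySem.Dict.contains_iff_mem_keys, hd2k] at h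
                rcases List.mem_append.1 h with h' | h'
                · exact hdisj _ h' _ (List.mem_cons_of_mem _ (List.mem_map_of_mem hkv)) rfl
                · simp only [List.mem_cons, List.not_mem_nil, or_false] at h'
                  rcases h' with h' | h'
                  · exact hanpost (h' ▸ List.mem_map_of_mem hkv)
                  · exact hne h')
              (by rw [hd2]; simp)
              (fun kv hkv hk => by
                have hkv' : ("tibetan_text", kv.2) = kv := by rw [← hk]
                exact (hget kv.2 (List.mem_append_right _
                  (List.mem_cons_of_mem _ (hkv' ▸ hkv)))).symm),
            hd2]
        rw [hfoldA]
        show (pre ++ [("Chinese_Simplified_text", va), ("tibetan_text",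
              (PySem.Dict.mk (pre ++ ("Chinese_Simplified_text", va) :: post)).getD
                "tibetan_text" "")])
              ++ post.filter (fun kv => kv.1 != "tibetan_text") =
          if (((pre ++ ("Chinese_Simplified_text", va) :: post).map Prod.fst).take
              ((pre.map Prod.fst).length + 1)).contains "tibetan_text" = true then
            (PySem.Dict.ofList (pre ++ ("Chinese_Simplified_text", va) :: post)).items
          else
            (PySem.Dict.ofList (PySem.List.insert
              ((pre ++ ("Chinese_Simplified_text", va) :: post).filter
                (fun kv => kv.1 != "tibetan_text"))
              (((pre.map Prod.fst).length : Int) + 1)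
              ("tibetan_text",
                (PySem.Dict.mk (pre ++ ("Chinese_Simplified_text", va) :: post)).getD
                  "tibetan_text" ""))).items
        rw [if_neg (by
          rw [htake]
          intro h
          rcases List.mem_append.1 (List.contains_iff_mem.1 h) with h' | h'
          · exact htp h'
          · simp at h')]
        have hfiltL : (pre ++ ("Chinese_Simplified_text", va) :: post).filter
            (fun kv => kv.1 != "tibetan_text")
            = pre ++ ("Chinese_Simplified_text", va) ::
                post.filter (fun kv => kv.1 != "tibetan_text") := by
          rw [List.filter_append, List.filter_cons]
          have hprefilt : pre.filter (fun kv => kv.1 != "tibetan_text") = pre := by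
            apply List.filter_eq_self.2
            intro kv hkv
            simp only [bne_iff_ne, ne_eq]
            exact fun he => htp (he ▸ List.mem_map_of_mem hkv)
          rw [hprefilt]
          simp
        rw [hfiltL]
        have hcast : ((pre.map Prod.fst).length : Int) + 1
            = (((pre.map Prod.fst).length + 1 : Nat) : Int) := by push_cast; ring
        rw [hcast, pyinsert_natCast _ _ _ (by simp)]
        have htake2 : (pre ++ ("Chinese_Simplified_text", va) ::
              post.filter (fun kv => kv.1 != "tibetan_text")).take
            ((pre.map Prod.fst).length + 1)
            = pre ++ [("Chinese_Simplified_text", va)] := by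
          rw [List.take_append, List.take_of_length_le (by simp)]
          congr 1
          have h4 : (pre.map Prod.fst).length + 1 - pre.length = 1 := by simp
          rw [h4]
          simp
        have hdrop2 : (pre ++ ("Chinese_Simplified_text", va) ::
              post.filter (fun kv => kv.1 != "tibetan_text")).drop
            ((pre.map Prod.fst).length + 1)
            = post.filter (fun kv => kv.1 != "tibetan_text") := by
          rw [List.drop_append, List.drop_of_length_le (by simp)]
          have h4 : (pre.map Prod.fst).length + 1 - pre.length = 1 := by simp
          rw [h4]
          simp
        rw [htake2, hdrop2]
        rw [ofList_items_of_nodup _ (by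
          simp only [List.map_append, List.map_cons, List.append_assoc,
            List.singleton_append]
          have hsub : ((post.filter (fun kv => kv.1 != "tibetan_text")).map
              Prod.fst).Sublist (post.map Prod.fst) :=
            List.filter_sublist.map _
          have hmemf : ∀ x, x ∈ (post.filter (fun kv => kv.1 != "tibetan_text")).map
              Prod.fst → x ∈ post.map Prod.fst :=
            fun x hx => hsub.mem hx
          have htbf : "tibetan_text" ∉ (post.filter
              (fun kv => kv.1 != "tibetan_text")).map Prod.fst := by
            intro h
            obtain ⟨q, hq, hq1⟩ := List.mem_map.1 h
            have := (List.mem_filter.1 hq).2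
            rw [hq1] at this
            simp at this
          refine List.nodup_append.2 ⟨hnd1, ?_, ?_⟩
          · refine List.nodup_cons.2 ⟨?_, List.nodup_cons.2 ⟨htbf, hnd3.sublist hsub⟩⟩
            intro h
            rcases List.mem_cons.1 h with h | h
            · exact htibne h.symm
            · exact hanpost (hmemf _ h)
          · intro x hx b hb
            simp only [List.mem_cons] at hb
            rcases hb with rfl | rfl | hb
            · exact fun he => hnotpre (he ▸ hx)
            · exact fun he => htp (he ▸ hx)
            · exact hdisj _ hx _ (List.mem_cons_of_mem _ (hmemf _ hb))
          )]
        simp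
    · have h3 : (l.map Prod.fst).contains "Chinese_Simplified_text" = false := by
        rw [Bool.eq_false_iff]
        intro h
        exact hanch (List.contains_iff_mem.1 h)
      have hc : List.foldl (fun d kv =>
            let d' := d.insert kv.1 kv.2
            if kv.1 == "Chinese_Simplified_text" then
              d'.insert "tibetan_text" ((PySem.Dict.mk l).getD "tibetan_text" "")
            else d') PySem.Dict.empty l
          = List.foldl (fun d kv => d.insert kv.1 kv.2) PySem.Dict.empty l := by
        apply PySem.List.foldl_congr_mem
        intro acc kv hkv
        have : kv.1 ≠ "Chinese_Simplified_text" :=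
          fun he => hanch (he ▸ List.mem_map_of_mem hkv)
        simp [this]
      have hfold : (List.foldl (fun d kv => d.insert kv.1 kv.2) PySem.Dict.empty l).items = l := by
        simpa using PySem.Dict.items_foldl_insert_fresh l Prod.fst Prod.snd PySem.Dict.empty
          (by simp) hpre
      rw [hc, hfold, if_pos (by rw [h3]; simp)]
      exact (ofList_items_of_nodup l hpre).symm
  · have h2 : (l.map Prod.fst).contains "text" = false := by
      rw [Bool.eq_false_iff]
      intro h
      exact htext (List.contains_iff_mem.1 h)
    have h1 : (l.any fun p => p.1 == "text") = false := by
      rw [List.any_eq_false]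
      intro p hp
      simp only [beq_iff_eq]
      exact fun he => htext (he ▸ List.mem_map_of_mem hp)
    rw [if_pos (by rw [PySem.Dict.contains_mk, h1]; simp),
      if_pos (by rw [h2]; simp)]
    exact (ofList_items_of_nodup l hpre).symm

-- ===== VERDICT (by name: the statement is the Claim_ definition above) =====
theorem add_tibetan_keys_to_paragraph_spec : Claim_equal_add_tibetan_keys_to_paragraph := by
  intro paragraph _ hpre
  show add_tibetan_keys_to_paragraph paragraph = add_tibetan_keys_to_paragraph_alt paragraph
  exact main_equiv paragraph hpre
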